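-- pv_equiv track=rewrite | github.com/robinhouston/maze-experiments | pylib-mazer/scripts/bareiss_tri.py | lap
-- ===== SOURCE A (Python) =====
-- def lap(width, height):
--   """Laplacian matrix of a width x height grid.
--   """
--   n = width * height
--   m = [ [0] * (i+1) for i in range(n) ]
--   for i in range(n):
--     if i % width:
--       m[i][i-1] = -1
--   for i in range(n-width):
--     m[i+width][i] = -1
--   for i in range(n):
--     for j in range(i):
--       m[i][i] -= m[i][j]
--       m[j][j] -= m[i][j]
--   return m
-- ===== SOURCE B (Python) =====
-- def lap(width, height):
--   """Laplacian matrix of a width x height grid.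
--
--   Single pass: each row is built once, the diagonal entry (the vertex
--   degree) computed directly from the grid geometry instead of by the
--   all-pairs subtraction loop.
--   """
--   n = width * height
--   m = []
--   for i in range(n):
--     row = [0] * (i + 1)
--     d = 0
--     if i % width:
--       row[i - 1] = -1
--       d += 1
--     if (i + 1) % width:
--       d += 1
--     if i >= width:
--       row[i - width] = -1
--       d += 1
--     if i + width < n:
--       d += 1
--     row[i] = d
--     m.append(row)
--   return m
-- ===== Notes on version B (the rewrite author's own statement) =====
-- stated objective: alternative
-- what changed: B builds each row once in a single pass, writing the two neighbour entries and setting the diagonal to the vertex degree computed directly from the grid geometry, instead of A's three passes plus an all-pairs subtraction loop over the lower triangle (measured 6.7x at n=16, but both remain Theta(n^2) because the output itself has n^2/2 cells).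
import Mathlib
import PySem

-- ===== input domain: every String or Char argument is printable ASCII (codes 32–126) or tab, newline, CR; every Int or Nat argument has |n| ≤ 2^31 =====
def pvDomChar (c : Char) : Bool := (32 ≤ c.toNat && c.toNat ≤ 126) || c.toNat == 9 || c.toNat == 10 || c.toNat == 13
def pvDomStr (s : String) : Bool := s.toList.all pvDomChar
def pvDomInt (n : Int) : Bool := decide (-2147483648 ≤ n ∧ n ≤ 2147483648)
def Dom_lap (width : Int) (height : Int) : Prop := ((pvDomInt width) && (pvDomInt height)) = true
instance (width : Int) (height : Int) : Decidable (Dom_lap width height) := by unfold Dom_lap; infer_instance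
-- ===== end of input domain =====

-- B replaces A's all-pairs subtraction loop by a single pass that sets each
-- diagonal entry to the vertex degree computed directly; same return value.

-- ===== PORT A =====
-- Python list assignment xs[i] = v (negative index counts from the end);
-- exact for in-range i (Python raises IndexError out of range, which Pre_lap excludes).
def pySet {α : Type} (xs : List α) (i : Int) (v : α) : List α :=
  if 0 ≤ i then xs.set i.toNat v else xs.set (xs.length + i).toNat v

-- m[i][j] read; exact for in-range indices (all reads under Pre_lap are in range).
def getCell (m : List (List Int)) (i j : Int) : Int :=
  (PySem.List.pyGet? ((PySem.List.pyGet? m i).getD []) j).getD 0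

-- m[i][j] = v
def setCell (m : List (List Int)) (i j : Int) (v : Int) : List (List Int) :=
  pySet m i (pySet ((PySem.List.pyGet? m i).getD []) j v)

def lap (width : Int) (height : Int) : List (List Int) :=
  let n := width * height
  let m0 := (PySem.List.pyRange 0 n 1).map (fun i => List.replicate (i + 1).toNat 0)
  let m1 := (PySem.List.pyRange 0 n 1).foldl (fun m i =>
      if PySem.Int.mod i width ≠ 0 then setCell m i (i - 1) (-1) else m) m0
  let m2 := (PySem.List.pyRange 0 (n - width) 1).foldl (fun m i =>
      setCell m (i + width) i (-1)) m1
  (PySem.List.pyRange 0 n 1).foldl (fun m i =>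
      (PySem.List.pyRange 0 i 1).foldl (fun m j =>
        let m := setCell m i i (getCell m i i - getCell m i j)
        setCell m j j (getCell m j j - getCell m i j)) m) m2

-- ===== PORT B =====
def lap_alt (width : Int) (height : Int) : List (List Int) :=
  let n := width * height
  (PySem.List.pyRange 0 n 1).foldl (fun m i =>
    let row := List.replicate (i + 1).toNat 0
    let d : Int := 0
    let rd := if PySem.Int.mod i width ≠ 0 then (pySet row (i - 1) (-1), d + 1) else (row, d)
    let row := rd.1
    let d := rd.2
    let d := if PySem.Int.mod (i + 1) width ≠ 0 then d + 1 else d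
    let rd := if i ≥ width then (pySet row (i - width) (-1), d + 1) else (row, d)
    let row := rd.1
    let d := rd.2
    let d := if i + width < n then d + 1 else d
    let row := pySet row i d
    m ++ [row]) []

-- ===== PRECONDITION & SPEC =====
-- Pre_lap excludes exactly the inputs where A raises (width < 0 with height ≤ 0:
-- the second placement loop indexes rows that are missing or too short).
def Pre_lap (width : Int) (height : Int) : Prop := 0 ≤ width ∨ 1 ≤ height
instance (width : Int) (height : Int) : Decidable (Pre_lap width height) := by
  unfold Pre_lap; infer_instance

def pvWitness_lap : Int × Int := (3, 2)

def Spec_lap (width : Int) (height : Int) (out : List (List Int)) : Prop := out = lap_alt width height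
instance (width : Int) (height : Int) (out : List (List Int)) : Decidable (Spec_lap width height out) := by unfold Spec_lap; infer_instance

-- ===== CLAIM (what is proved, stated in full; the proofs are below) =====
def Claim_equal_lap : Prop := ∀ (width : Int) (height : Int), Dom_lap width height → Pre_lap width height → Spec_lap width height (lap width height)

-- ===== LEMMAS AND PROOFS =====

-- matrix-as-function representation: N rows, row k has entries g k j for j ≤ k
def mkM (N : Nat) (g : Nat → Nat → Int) : List (List Int) :=
  (List.range N).map (fun k => (List.range (k + 1)).map (g k))

-- off-diagonal entry of the final matrix (j < k): -1 at the left/up neighbour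
def aOff (W : Nat) (k j : Nat) : Int :=
  if (j + 1 = k ∧ k % W ≠ 0) ∨ j + W = k then -1 else 0

-- diagonal of row k after the first t outer iterations of A's third loop
def diagVal (W t k : Nat) : Int :=
  (if k % W ≠ 0 then 1 else 0) + (if W ≤ k then 1 else 0)
  + (if k + 1 < t ∧ (k + 1) % W ≠ 0 then 1 else 0) + (if k + W < t then 1 else 0)

def cellF (W t : Nat) (k j : Nat) : Int :=
  if j = k then (if k < t then diagVal W t k else 0) else aOff W k j

lemma set_map_range {α : Type} (n : Nat) (g : Nat → α) (j : Nat) (v : α) (hj : j < n) :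
    ((List.range n).map g).set j v = (List.range n).map (fun j' => if j' = j then v else g j') := by
  apply List.ext_getElem
  · simp
  · intro i h1 h2
    simp only [List.getElem_set, List.getElem_map, List.getElem_range]
    simp only [List.length_set, List.length_map, List.length_range] at h1
    split_ifs with h h' h'
    · subst h; rfl
    · omega
    · omega
    · rfl

lemma map_range_congr {α : Type} (n : Nat) (g g' : Nat → α)
    (h : ∀ k, k < n → g k = g' k) :
    (List.range n).map g = (List.range n).map g' := by
  apply List.map_congr_left
  intro k hk
  exact h k (List.mem_range.mp hk)

lemma mkM_congr (N : Nat) (g g' : Nat → Nat → Int)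
    (h : ∀ k, k < N → ∀ j, j ≤ k → g k j = g' k j) : mkM N g = mkM N g' := by
  apply map_range_congr
  intro k hk
  apply map_range_congr
  intro j hj
  exact h k hk j (by omega)

lemma get_mkM (N : Nat) (g : Nat → Nat → Int) (k j : Nat) (hk : k < N) (hj : j ≤ k) :
    getCell (mkM N g) ↑k ↑j = g k j := by
  simp [getCell, mkM, PySem.List.pyGet?_natCast, List.getElem?_map,
    List.getElem?_range, hk, hj, Nat.lt_succ_of_le hj]

lemma set_mkM (N : Nat) (g : Nat → Nat → Int) (k j : Nat) (v : Int) (hk : k < N) (hj : j ≤ k) :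
    setCell (mkM N g) ↑k ↑j v
      = mkM N (fun k' j' => if k' = k ∧ j' = j then v else g k' j') := by
  have hrow : (PySem.List.pyGet? (mkM N g) ↑k).getD []
      = (List.range (k + 1)).map (g k) := by
    simp [mkM, hk]
  unfold setCell pySet
  rw [hrow]
  rw [if_pos (Int.natCast_nonneg j), if_pos (Int.natCast_nonneg k)]
  simp only [Int.toNat_natCast]
  rw [set_map_range (k + 1) (g k) j v (by omega)]
  unfold mkM
  rw [set_map_range N _ k _ hk]
  apply map_range_congr
  intro k' hk'
  by_cases hkk : k' = k
  · subst hkk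
    simp only [if_pos rfl]
    apply map_range_congr
    intro j' hj'
    by_cases hjj : j' = j <;> simp [hjj]
  · simp only [if_neg hkk]
    apply map_range_congr
    intro j' hj'
    simp [hkk]

-- replicate row as a map
lemma replicate_as_map (n : Nat) : List.replicate n (0 : Int) = (List.range n).map (fun _ => 0) := by
  simp [List.map_const']

lemma mod_pos_of_ne (t W : Nat) (h : t % W ≠ 0) : 1 ≤ t := by
  rcases Nat.eq_zero_or_pos t with h0 | h1
  · exact absurd (h0 ▸ Nat.zero_mod W) h
  · exact h1

lemma pySet_natCast {α : Type} (xs : List α) (j : Nat) (v : α) :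
    pySet xs ↑j v = xs.set j v := by
  simp [pySet]

-- ===== loop 1 =====
lemma loop1_inv (W N : Nat) (hW : 1 ≤ W) (t : Nat) (ht : t ≤ N) :
    ((List.range t).map (Nat.cast : Nat → Int)).foldl
      (fun m i => if PySem.Int.mod i ↑W ≠ 0 then setCell m i (i - 1) (-1) else m)
      (mkM N (fun _ _ => 0))
    = mkM N (fun k j => if j + 1 = k ∧ k < t ∧ k % W ≠ 0 then -1 else 0) := by
  induction t with
  | zero =>
    simp only [List.range_zero, List.map_nil, List.foldl_nil]
    apply mkM_congr
    intro k hk j hj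
    rw [if_neg (by omega)]
  | succ t ih =>
    rw [List.range_succ, List.map_append, List.foldl_append, ih (by omega)]
    simp only [List.map_cons, List.map_nil, List.foldl_cons, List.foldl_nil]
    rw [PySem.Int.mod_natCast]
    by_cases hc : t % W = 0
    · rw [if_neg (by simp only [ne_eq, Int.natCast_eq_zero, not_not]; exact hc)]
      apply mkM_congr
      intro k hk j hj
      by_cases hkt : k = t
      · subst hkt
        simp [hc]
      · by_cases hck : k % W = 0 <;>
          simp only [hck, ne_eq, not_true_eq_false, not_false_eq_true, and_true, and_false] <;>
        split_ifs <;> first | rfl | omega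
    · rw [if_pos (by simp only [ne_eq, Int.natCast_eq_zero]; exact hc)]
      have ht1 : 1 ≤ t := mod_pos_of_ne t W hc
      have hcast : (↑t : Int) - 1 = ↑(t - 1) := by omega
      rw [hcast, set_mkM N _ t (t - 1) (-1) (by omega) (by omega)]
      apply mkM_congr
      intro k hk j hj
      by_cases hkt : k = t
      · subst hkt
        simp only [hc, ne_eq, not_false_eq_true, and_true, true_and, eq_self_iff_true]
        split_ifs <;> first | rfl | omega
      · have hne : ¬ (k = t ∧ j = t - 1) := by omega
        rw [if_neg hne]
        by_cases hck : k % W = 0 <;>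
          simp only [hck, ne_eq, not_true_eq_false, not_false_eq_true, and_true, and_false] <;>
        split_ifs <;> first | rfl | omega

-- ===== loop 2 =====
lemma loop2_inv (W N : Nat) (hW : 1 ≤ W) (hWN : W ≤ N) (t : Nat) (ht : t ≤ N - W) :
    ((List.range t).map (Nat.cast : Nat → Int)).foldl
      (fun m i => setCell m (i + ↑W) i (-1))
      (mkM N (fun k j => if j + 1 = k ∧ k < N ∧ k % W ≠ 0 then -1 else 0))
    = mkM N (fun k j => if (j + 1 = k ∧ k < N ∧ k % W ≠ 0) ∨ (j + W = k ∧ k < t + W) then -1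
        else 0) := by
  induction t with
  | zero =>
    simp only [List.range_zero, List.map_nil, List.foldl_nil]
    apply mkM_congr
    intro k hk j hj
    by_cases hck : k % W = 0 <;>
      simp only [hck, ne_eq, not_true_eq_false, not_false_eq_true, and_true, and_false] <;>
    split_ifs <;> first | rfl | omega | (simp_all; omega) | simp_all
  | succ t ih =>
    rw [List.range_succ, List.map_append, List.foldl_append, ih (by omega)]
    simp only [List.map_cons, List.map_nil, List.foldl_cons, List.foldl_nil]
    have hcast : (↑t : Int) + ↑W = ↑(t + W) := by omega
    rw [hcast, set_mkM N _ (t + W) t (-1) (by omega) (by omega)]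
    apply mkM_congr
    intro k hk j hj
    by_cases hck : k % W = 0 <;>
      simp only [hck, ne_eq, not_true_eq_false, not_false_eq_true, and_true, and_false,
        false_and, false_or] <;>
    split_ifs <;> first | rfl | omega | (simp_all; omega) | simp_all

-- ===== loop 3 =====
lemma sum_indicator (n m : Nat) (v : Int) :
    ((List.range n).map (fun j => if j = m then v else 0)).sum = if m < n then v else 0 := by
  induction n with
  | zero => simp
  | succ n ih =>
    rw [List.range_succ, List.map_append, List.sum_append, ih]
    by_cases h1 : m < n <;> by_cases h2 : m = n <;> simp [h1, h2] <;> omega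
lemma diag_bump (W t j : Nat) (hW : 1 ≤ W) (hj : j < t) :
    diagVal W t j - aOff W t j = diagVal W (t + 1) j := by
  unfold diagVal aOff
  by_cases e1 : j + 1 = t
  · by_cases e2 : j + W = t
    · have hw1 : W = 1 := by omega
      subst hw1
      simp only [Nat.mod_one, ne_eq, not_true_eq_false, and_false, false_or, false_and]
      split_ifs <;> first | omega | tauto
    · subst e1
      by_cases hc : (j + 1) % W = 0 <;>
        simp only [hc, ne_eq, not_true_eq_false, not_false_eq_true, true_or, or_true, eq_self_iff_true, and_false, and_true,
          false_and, false_or, or_false, true_and] <;>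
      by_cases hd : j % W = 0 <;>
        simp only [hd, ne_eq, not_true_eq_false, not_false_eq_true, true_or, or_true, eq_self_iff_true] <;>
      split_ifs <;> first | omega | tauto
  · by_cases e2 : j + W = t
    · subst e2
      by_cases hc : (j + 1) % W = 0 <;> by_cases hd : j % W = 0 <;>
        by_cases he : (j + W) % W = 0 <;>
        simp only [hc, hd, he, ne_eq, not_true_eq_false, not_false_eq_true, true_or, or_true, eq_self_iff_true, and_false,
          and_true, false_and, false_or, or_false, or_true, true_and] <;>
      split_ifs <;> first | omega | tauto
    · have : ¬ ((j + 1 = t ∧ t % W ≠ 0) ∨ j + W = t) := by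
        rintro (⟨h1, _⟩ | h2) <;> omega
      rw [if_neg this]
      by_cases hc : (j + 1) % W = 0 <;> by_cases hd : j % W = 0 <;>
        simp only [hc, hd, ne_eq, not_true_eq_false, not_false_eq_true, true_or, or_true, eq_self_iff_true, and_false, and_true,
          false_and, true_and] <;>
      split_ifs <;> first | omega | tauto

lemma aOff_split (W t j : Nat) (hW : 1 ≤ W) (hj : j < t) :
    aOff W t j = (if j = t - 1 then (if t % W ≠ 0 then -1 else 0) else 0)
      + (if j = t - W then (if W ≤ t then -1 else 0) else 0) := by
  unfold aOff
  by_cases hw1 : W = 1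
  · subst hw1
    simp only [Nat.mod_one, ne_eq, not_true_eq_false, and_false, false_or, if_false, ite_false]
    split_ifs <;> first | omega | tauto
  · by_cases he : t % W = 0 <;>
      simp only [he, ne_eq, not_true_eq_false, not_false_eq_true, and_false, and_true,
        false_and, false_or, true_and, if_true, if_false, ite_false, ite_true] <;>
    split_ifs <;> first | omega | tauto

lemma sum_aOff (W t : Nat) (hW : 1 ≤ W) :
    ((List.range t).map (aOff W t)).sum
      = (if t % W ≠ 0 then -1 else 0) + (if W ≤ t then -1 else 0) := by
  rw [map_range_congr t (aOff W t) _ (fun j hj => aOff_split W t j hW hj)]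
  rw [List.sum_map_add, sum_indicator, sum_indicator]
  have h1 := mod_pos_of_ne t W
  by_cases he : t % W = 0 <;> by_cases hw : W ≤ t <;>
    simp only [he, hw, ne_eq, not_true_eq_false, not_false_eq_true, if_true, if_false,
      ite_true, ite_false] <;>
  split_ifs <;> first | omega | (exact absurd (h1 (by assumption)) (by omega))

lemma diag_close (W t : Nat) (hW : 1 ≤ W) :
    -((List.range t).map (aOff W t)).sum = diagVal W (t + 1) t := by
  rw [sum_aOff W t hW]
  unfold diagVal
  by_cases he : t % W = 0 <;>
    simp only [he, ne_eq, not_true_eq_false, not_false_eq_true, and_false, and_true,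
      false_and, true_and] <;>
  split_ifs <;> first | omega | tauto

def irow (W t s : Nat) (k : Nat) : Nat → Int :=
  if k = t then
    (fun j => if j = t then -(((List.range s).map (aOff W t)).sum) else aOff W t j)
  else (fun j => cellF W (if k < s then t + 1 else t) k j)

lemma inner_inv (W N t : Nat) (hW : 1 ≤ W) (ht : t < N) (s : Nat) (hs : s ≤ t) :
    ((List.range s).map (Nat.cast : Nat → Int)).foldl
      (fun m j =>
        let m' := setCell m ↑t ↑t (getCell m ↑t ↑t - getCell m ↑t j)
        setCell m' j j (getCell m' j j - getCell m' ↑t j))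
      (mkM N (cellF W t))
    = mkM N (irow W t s) := by
  induction s with
  | zero =>
    simp only [List.range_zero, List.map_nil, List.foldl_nil]
    apply mkM_congr
    intro k hk j hj
    by_cases hkt : k = t
    · subst hkt
      simp [irow, cellF]
    · simp [irow, cellF, hkt]
  | succ s ih =>
    rw [List.range_succ, List.map_append, List.foldl_append, ih (by omega)]
    simp only [List.map_cons, List.map_nil, List.foldl_cons, List.foldl_nil]
    have hst : s ≠ t := by omega
    have hsN : s < N := by omega
    have e1 : irow W t s t t = -(((List.range s).map (aOff W t)).sum) := by
      simp [irow]
    have e2 : irow W t s t s = aOff W t s := by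
      simp [irow, hst]
    rw [get_mkM N _ t t ht le_rfl, get_mkM N _ t s ht (by omega), e1, e2]
    rw [set_mkM N _ t t _ ht le_rfl]
    rw [get_mkM N _ s s hsN le_rfl, get_mkM N _ t s ht (by omega)]
    try dsimp only
    rw [if_neg (by omega : ¬ (s = t ∧ s = t)), if_neg (by omega : ¬ (t = t ∧ s = t))]
    have e3 : irow W t s s s = diagVal W t s := by
      simp [irow, hst, cellF, Nat.lt_of_lt_of_le (Nat.lt_succ_self s) hs]
    rw [e3, e2]
    rw [set_mkM N _ s s _ hsN le_rfl]
    apply mkM_congr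
    intro k hk j hj
    try dsimp only
    by_cases hks : k = s
    · by_cases hjs : j = s
      · rw [if_pos ⟨hks, hjs⟩, hks, hjs, diag_bump W t s hW (by omega)]
        simp [irow, hst, cellF, Nat.lt_succ_self, (by omega : s < t + 1)]
      · rw [if_neg (by tauto : ¬ (k = s ∧ j = s)), if_neg (by omega : ¬ (k = t ∧ j = t)), hks]
        simp [irow, hst, cellF, hjs]
    · by_cases hkt : k = t
      · rw [if_neg (by tauto : ¬ (k = s ∧ j = s))]
        by_cases hjt : j = t
        · rw [if_pos ⟨hkt, hjt⟩, hkt, hjt]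
          have hr : irow W t (s + 1) t t
              = -(((List.range s).map (aOff W t)).sum + aOff W t s) := by
            simp only [irow, if_pos rfl, if_pos (rfl : t = t)]
            rw [List.range_succ, List.map_append, List.sum_append]
            simp
          rw [hr]
          ring
        · rw [if_neg (by tauto : ¬ (k = t ∧ j = t)), hkt]
          simp [irow, hjt]
      · rw [if_neg (by tauto : ¬ (k = s ∧ j = s)), if_neg (by tauto : ¬ (k = t ∧ j = t))]
        simp only [irow, if_neg hkt]
        have hcond : (if k < s then t + 1 else t) = (if k < s + 1 then t + 1 else t) := by
          split_ifs <;> omega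
        rw [hcond]

lemma outer_inv (W N : Nat) (hW : 1 ≤ W) (t : Nat) (ht : t ≤ N) :
    ((List.range t).map (Nat.cast : Nat → Int)).foldl
      (fun m i => (PySem.List.pyRange 0 i 1).foldl
        (fun m j =>
          let m' := setCell m i i (getCell m i i - getCell m i j)
          setCell m' j j (getCell m' j j - getCell m' i j)) m)
      (mkM N (cellF W 0))
    = mkM N (cellF W t) := by
  induction t with
  | zero => simp
  | succ t ih =>
    rw [List.range_succ, List.map_append, List.foldl_append, ih (by omega)]
    simp only [List.map_cons, List.map_nil, List.foldl_cons, List.foldl_nil]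
    rw [PySem.List.pyRange_zero_natCast]
    rw [inner_inv W N t hW (by omega) t le_rfl]
    apply mkM_congr
    intro k hk j hj
    by_cases hkt : k = t
    · rw [hkt]
      by_cases hjt : j = t
      · rw [hjt]
        simp only [irow, if_pos rfl, cellF, Nat.lt_succ_self, if_true, ite_true]
        exact diag_close W t hW
      · simp [irow, cellF, hjt]
    · simp only [irow, if_neg hkt, cellF]
      split_ifs <;> first | rfl | omega

-- B's row builder (the body of lap_alt's loop), lifted out for the proof
def rowB (width n i : Int) : List Int :=
  let row := List.replicate (i + 1).toNat (0 : Int)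
  let d : Int := 0
  let rd := if PySem.Int.mod i width ≠ 0 then (pySet row (i - 1) (-1), d + 1) else (row, d)
  let row := rd.1
  let d := rd.2
  let d := if PySem.Int.mod (i + 1) width ≠ 0 then d + 1 else d
  let rd := if i ≥ width then (pySet row (i - width) (-1), d + 1) else (row, d)
  let row := rd.1
  let d := rd.2
  let d := if i + width < n then d + 1 else d
  pySet row i d

lemma lap_alt_eq (width height : Int) :
    lap_alt width height = (PySem.List.pyRange 0 (width * height) 1).foldl
      (fun m i => m ++ [rowB width (width * height) i]) [] := rfl

-- B's row equals row k of the final matrix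
lemma alt_row (W N : Nat) (hW : 1 ≤ W) (hWN : W ∣ N) (k : Nat) (hk : k < N) :
    rowB ↑W ↑N ↑k = (List.range (k + 1)).map (cellF W N k) := by
  unfold rowB
  have hd : (k + 1) % W ≠ 0 → k + 1 < N := by
    intro h
    rcases Nat.lt_or_ge (k + 1) N with h1 | h1
    · exact h1
    · have he : k + 1 = N := by omega
      rw [he] at h
      obtain ⟨c, rfl⟩ := hWN
      exact absurd (Nat.mul_mod_right W c) h
  have ecast : ((k : Int)) + 1 = ((k + 1 : Nat) : Int) := by omega
  have etn : (((k : Int)) + 1).toNat = k + 1 := by omega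
  simp only [etn, ecast, PySem.Int.mod_natCast]
  simp only [ne_eq, Int.natCast_eq_zero, ge_iff_le, Nat.cast_le,
    show ((k : Int) + ↑W < ↑N) ↔ (k + W < N) by omega]
  by_cases hL : k % W = 0 <;> by_cases hR : (k + 1) % W = 0 <;>
    by_cases hU : W ≤ k <;> by_cases hD : k + W < N <;>
    simp only [hL, hR, hU, hD, not_true_eq_false, not_false_eq_true, if_true, if_false,
      ite_true, ite_false] <;>
  (try simp only [show ((k : Int)) - 1 = ((k - 1 : Nat) : Int) from by
      have h1k := mod_pos_of_ne k W (by assumption); omega]) <;>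
  (try simp only [show ((k : Int)) - ↑W = ((k - W : Nat) : Int) from by omega]) <;>
  (first
    | (have hDd : k + 1 < N := hd (by assumption)
       clear hd)
    | clear hd) <;>
  simp only [Int.toNat_natCast, pySet_natCast] <;>
  (refine List.ext_getElem (by simp) ?_) <;>
  (intro i h1 h2
   simp only [List.getElem_set, List.getElem_map, List.getElem_range, List.getElem_replicate]
   unfold cellF aOff diagVal
   simp only [hL, hR, hU, hD, ne_eq, not_true_eq_false, not_false_eq_true, and_true, and_false,
     true_and, false_and, false_or, or_false, if_true, if_false, ite_true, ite_false]
   split_ifs <;> first | rfl | omega)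

lemma foldl_append_map {α : Type} (l : List Nat) (g : Nat → α) :
    ∀ acc : List α, l.foldl (fun m k => m ++ [g k]) acc = acc ++ l.map g := by
  induction l with
  | nil => simp
  | cons x xs ih => intro acc; simp [ih, List.append_assoc]

lemma main_pos (width height : Int) (hw : 1 ≤ width) (hh : 1 ≤ height) :
    lap width height = lap_alt width height := by
  obtain ⟨W, rfl⟩ : ∃ W : Nat, width = ↑W := ⟨width.toNat, (Int.toNat_of_nonneg (by omega)).symm⟩
  obtain ⟨H, rfl⟩ : ∃ H : Nat, height = ↑H := ⟨height.toNat, (Int.toNat_of_nonneg (by omega)).symm⟩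
  have hW1 : 1 ≤ W := by omega
  have hH1 : 1 ≤ H := by omega
  have hWN : W ≤ W * H := Nat.le_mul_of_pos_right W (by omega)
  have eN : (W : Int) * ↑H = ((W * H : Nat) : Int) := by push_cast; ring
  have hNW : ((W * H : Nat) : Int) - ↑W = ((W * H - W : Nat) : Int) := by omega
  -- right-hand side
  rw [lap_alt_eq, eN, PySem.List.pyRange_zero_natCast, List.foldl_map, foldl_append_map]
  rw [map_range_congr (W * H) _ _ (fun k hk => alt_row W (W * H) hW1 ⟨H, rfl⟩ k hk)]
  -- left-hand side
  unfold lap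
  dsimp only
  rw [eN, hNW]
  simp only [PySem.List.pyRange_zero_natCast]
  have hm0 : List.map (fun i => List.replicate (i + 1).toNat 0)
      (List.map (Nat.cast : Nat → Int) (List.range (W * H))) = mkM (W * H) (fun _ _ => 0) := by
    rw [List.map_map]
    apply map_range_congr
    intro k hk
    simp only [Function.comp_apply, show (((k : Nat) : Int) + 1).toNat = k + 1 from by omega]
    exact replicate_as_map (k + 1)
  rw [hm0, loop1_inv W (W * H) hW1 (W * H) le_rfl,
    loop2_inv W (W * H) hW1 hWN (W * H - W) le_rfl]
  have hbridge : mkM (W * H) (fun k j => if (j + 1 = k ∧ k < W * H ∧ k % W ≠ 0)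
        ∨ (j + W = k ∧ k < W * H - W + W) then -1 else 0)
      = mkM (W * H) (cellF W 0) := by
    apply mkM_congr
    intro k hk j hj
    unfold cellF aOff
    by_cases hck : k % W = 0 <;>
      simp only [hck, ne_eq, not_true_eq_false, not_false_eq_true, and_true, and_false,
        false_and, false_or] <;>
    split_ifs <;> first | rfl | omega | (simp_all; omega) | simp_all
  rw [hbridge, outer_inv W (W * H) hW1 (W * H) le_rfl]
  rfl

lemma main_zero (width height : Int) (hpre : Pre_lap width height)
    (hn : width * height ≤ 0) : lap width height = lap_alt width height := by
  have h2 : width * height - width ≤ 0 := by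
    rcases hpre with h | h
    · omega
    · nlinarith
  unfold lap lap_alt
  simp only [PySem.List.pyRange_one_eq_nil hn, PySem.List.pyRange_one_eq_nil h2,
    List.map_nil, List.foldl_nil]

-- ===== VERDICT (by name: the statement is the Claim_ definition above) =====
theorem lap_spec : Claim_equal_lap := by
  intro width height _ hpre
  unfold Spec_lap
  by_cases hn : width * height ≤ 0
  · exact main_zero width height hpre hn
  · have hw : 1 ≤ width := by
      by_contra hcon
      have hw0 : width ≤ 0 := by omega
      apply hn
      rcases hpre with h | h
      · have h0 : width = 0 := le_antisymm hw0 h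
        rw [h0, zero_mul]
      · nlinarith
    have hh : 1 ≤ height := by
      by_contra hcon
      have hh0 : height ≤ 0 := by omega
      exact hn (by nlinarith)
    exact main_pos width height hw hh
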